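-- pv_equiv track=rewrite | github.com/bucko909/tax-stuff | tax.py | rate_sensible
-- ===== SOURCE A (Python) =====
-- def rate_sensible(rates, amount):
-- 	so_far = 0
-- 	last_rate = 0
-- 	total = 0
-- 	for (low, rate) in rates:
-- 		if low > amount:
-- 			break
-- 		total += (rate - last_rate) * (amount - low)
-- 		last_rate = rate
-- 	return total
-- ===== SOURCE B (Python) =====
-- def rate_sensible(rates, amount):
--     # Staged passes: find the cut where bands stop applying, slice the active bands,
--     # pair each with the next band's threshold (amount for the last), and sum rate*width.
--     k = 0
--     while k < len(rates) and rates[k][0] <= amount: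
--         k += 1
--     active = rates[:k]
--     bounds = [low for low, _ in active[1:]] + [amount]
--     return sum(rate * (hi - low) for (low, rate), hi in zip(active, bounds))
-- ===== Notes on version B (the rewrite author's own statement) =====
-- stated objective: alternative
-- what changed: Replaces A's single loop with running last_rate telescoping accumulator by staged passes: find the cut index of applicable bands, slice them, zip each band with the next band's threshold (amount for the last), and sum rate*width; summation-by-parts gives the same total.
import Mathlib
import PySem

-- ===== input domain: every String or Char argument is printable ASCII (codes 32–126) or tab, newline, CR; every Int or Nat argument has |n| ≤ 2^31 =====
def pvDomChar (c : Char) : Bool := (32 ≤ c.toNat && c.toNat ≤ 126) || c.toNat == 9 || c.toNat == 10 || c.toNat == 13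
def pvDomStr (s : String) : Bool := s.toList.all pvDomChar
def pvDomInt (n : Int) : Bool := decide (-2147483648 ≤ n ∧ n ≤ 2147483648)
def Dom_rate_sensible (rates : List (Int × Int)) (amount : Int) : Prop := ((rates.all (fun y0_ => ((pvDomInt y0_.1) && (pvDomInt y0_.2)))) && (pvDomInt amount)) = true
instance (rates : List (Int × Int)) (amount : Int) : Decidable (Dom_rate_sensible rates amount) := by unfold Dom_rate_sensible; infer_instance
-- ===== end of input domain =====

-- B replaces A's single loop with a running last_rate accumulator by staged passes
-- (cut index, slice of active bands, zip with next-threshold bounds, sum of rate*width);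
-- alternative decomposition, same cost.

-- ===== PORT A =====
-- the for-loop with state (last_rate, total), breaking at the first low > amount
def rateSensibleLoop (rates : List (Int × Int)) (amount last_rate total : Int) : Int :=
  match rates with
  | [] => total
  | (low, rate) :: rest =>
    if low > amount then total
    else rateSensibleLoop rest amount rate (total + (rate - last_rate) * (amount - low))

def rate_sensible (rates : List (Int × Int)) (amount : Int) : Int :=
  rateSensibleLoop rates amount 0 0

-- ===== PORT B =====
-- the while loop counting applicable bands (Source B's `while k < len(rates) and rates[k][0] <= amount`)
def altCut (rates : List (Int × Int)) (amount : Int) : Nat :=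
  match rates with
  | [] => 0
  | (low, _) :: rest => if low ≤ amount then altCut rest amount + 1 else 0

def rate_sensible_alt (rates : List (Int × Int)) (amount : Int) : Int :=
  let active := rates.take (altCut rates amount)
  let bounds := (active.drop 1).map Prod.fst ++ [amount]
  ((active.zip bounds).map (fun p => p.1.2 * (p.2 - p.1.1))).sum

-- ===== PRECONDITION & SPEC =====
def Spec_rate_sensible (rates : List (Int × Int)) (amount : Int) (out : Int) : Prop := out = rate_sensible_alt rates amount
instance (rates : List (Int × Int)) (amount : Int) (out : Int) : Decidable (Spec_rate_sensible rates amount out) := by unfold Spec_rate_sensible; infer_instance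

-- ===== CLAIM (what is proved, stated in full; the proofs are below) =====
def Claim_equal_rate_sensible : Prop := ∀ (rates : List (Int × Int)) (amount : Int), Dom_rate_sensible rates amount → Spec_rate_sensible rates amount (rate_sensible rates amount)

-- ===== LEMMAS AND PROOFS =====

-- proof-side lookahead recursion: per-band slice-width sum; bridges the two ports
def lookSum (rates : List (Int × Int)) (amount : Int) : Int :=
  match rates with
  | [] => 0
  | (low, rate) :: rest =>
    if low > amount then 0
    else
      let high := match rest with
        | [] => amount
        | (nlow, _) :: _ => min nlow amount
      rate * (high - low) + lookSum rest amount

-- the untaxed-head correction: a - low when the head band applies, else 0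
def headSlack (rates : List (Int × Int)) (amount : Int) : Int :=
  match rates with
  | [] => 0
  | (low, _) :: _ => if low > amount then 0 else amount - low

-- loop invariant relating A's telescoping accumulator to the slice-width sum
theorem rateLoop_eq (rates : List (Int × Int)) (amount : Int) :
    ∀ last_rate total : Int,
      rateSensibleLoop rates amount last_rate total =
        total + lookSum rates amount - last_rate * headSlack rates amount := by
  induction rates with
  | nil => intro lr t; simp [rateSensibleLoop, lookSum, headSlack]
  | cons hd rest ih =>
    intro lr t
    obtain ⟨low, rate⟩ := hd
    by_cases h : low > amount
    · simp [rateSensibleLoop, lookSum, headSlack, h]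
    · simp only [rateSensibleLoop, lookSum, headSlack, h, if_false]
      rw [ih]
      cases rest with
      | nil => simp [lookSum, headSlack]; ring
      | cons hd2 rest2 =>
        obtain ⟨nlow, r2⟩ := hd2
        simp only [headSlack]
        by_cases h2 : nlow > amount
        · simp only [if_pos h2]
          have : min nlow amount = amount := by omega
          rw [this]; ring
        · simp only [if_neg h2]
          have : min nlow amount = nlow := by omega
          rw [this]; ring

-- B's staged pipeline equals the lookahead recursion
theorem alt_eq_lookSum (rates : List (Int × Int)) (amount : Int) :
    rate_sensible_alt rates amount = lookSum rates amount := by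
  induction rates with
  | nil => simp [rate_sensible_alt, altCut, lookSum]
  | cons hd rest ih =>
    obtain ⟨low, rate⟩ := hd
    by_cases h : low > amount
    · have h' : ¬ low ≤ amount := by omega
      simp [rate_sensible_alt, altCut, lookSum, h, h']
    · have h' : low ≤ amount := by omega
      simp only [rate_sensible_alt, altCut, lookSum, h, if_false, if_pos h',
        List.take_succ_cons] at ih ⊢
      cases rest with
      | nil => simp [altCut, lookSum]
      | cons hd2 rest2 =>
        obtain ⟨nlow, r2⟩ := hd2
        by_cases h2 : nlow > amount
        · have h2' : ¬ nlow ≤ amount := by omega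
          have : min nlow amount = amount := by omega
          simp [altCut, h2', lookSum, this]
        · have h2' : nlow ≤ amount := by omega
          have hm : min nlow amount = nlow := by omega
          simp only [altCut, if_pos h2', List.take_succ_cons, List.drop_succ_cons, hm] at ih ⊢
          rw [← ih]
          simp [List.cons_append]

-- ===== VERDICT (by name: the statement is the Claim_ definition above) =====
theorem rate_sensible_spec : Claim_equal_rate_sensible := by
  intro rates amount _
  unfold Spec_rate_sensible rate_sensible
  rw [alt_eq_lookSum, rateLoop_eq]
  ring
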